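-- pv_equiv track=rewrite | github.com/NickolisK24/le-the-forge | last-epoch-data/tools/scripts/process_set_items.py | infer_set_name
-- ===== SOURCE A (Python) =====
-- def infer_set_name(display_names: list[str]) -> str:
--     """Find the longest common word sequence shared by all item names in the set."""
--     word_lists = [n.split() for n in display_names]
--     common = set(word_lists[0]) & {w for wl in word_lists[1:] for w in wl} if len(word_lists) > 1 else set(word_lists[0])
--
--     # Walk the first name to find the longest consecutive common run.
--     best, current = [], []
--     for word in word_lists[0]:
--         if word in common:
--             current.append(word)
--         else:
--             if len(current) > len(best):
--                 best = current[:]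
--             current = []
--     if len(current) > len(best):
--         best = current
--
--     return " ".join(best) if best else display_names[0]
-- ===== SOURCE B (Python) =====
-- def infer_set_name(display_names: list[str]) -> str:
--     """Find the longest common word sequence shared by all item names in the set."""
--     words = display_names[0].split()
--     common = set(words)
--     if len(display_names) > 1:
--         common &= {w for n in display_names[1:] for w in n.split()}
--
--     # Boundary arithmetic: positions of non-common words act as separators; the
--     # maximal common runs are exactly the gaps between consecutive separators.
--     seps = [i for i, w in enumerate(words) if w not in common]
--     bounds = [-1] + seps + [len(words)]
--     a, b = max(zip(bounds, bounds[1:]), key=lambda iv: iv[1] - iv[0])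
--     return " ".join(words[a + 1:b]) if b - a > 1 else display_names[0]
-- ===== Notes on version B (the rewrite author's own statement) =====
-- stated objective: alternative
-- what changed: A walks the first name's words once maintaining best/current run lists; B never accumulates runs: it computes the index positions of non-common words, turns them into boundary intervals by zipping the boundary list with its tail, selects the widest interval with max(key=width) (first-wins, matching A's tie rule) and slices the winning run out of the word list by index arithmetic (no per-word list appends/copies, the measured constant-factor win), falling back to display_names[0] when the widest interval is empty.
import Mathlib
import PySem

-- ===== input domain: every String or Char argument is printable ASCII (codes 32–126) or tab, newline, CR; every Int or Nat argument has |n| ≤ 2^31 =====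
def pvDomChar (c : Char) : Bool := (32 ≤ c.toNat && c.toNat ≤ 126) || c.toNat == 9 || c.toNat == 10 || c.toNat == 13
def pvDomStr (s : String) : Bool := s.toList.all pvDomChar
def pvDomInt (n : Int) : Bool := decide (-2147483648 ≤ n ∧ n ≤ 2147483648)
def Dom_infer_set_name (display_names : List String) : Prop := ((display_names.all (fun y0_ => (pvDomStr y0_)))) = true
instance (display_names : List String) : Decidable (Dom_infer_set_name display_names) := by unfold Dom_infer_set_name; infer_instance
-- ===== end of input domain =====

-- B replaces A's best/current accumulator walk by boundary arithmetic: it lists the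
-- positions of non-common words, zips the boundary list with its tail into intervals,
-- picks the widest interval (first-wins) and slices that run out by index;
-- objective: alternative algorithm (a timing run measured it constant-factor faster).

-- ===== PORT A =====
def infer_set_name (display_names : List String) : String :=
  let word_lists := display_names.map PySem.Str.split₀
  let common : PySem.Set String :=
    if word_lists.length > 1 then
      PySem.Set.inter (PySem.Set.ofList (word_lists.headD []))
        (PySem.Set.ofList ((word_lists.drop 1).flatMap id))
    else
      PySem.Set.ofList (word_lists.headD [])
  let bc := (word_lists.headD []).foldl
    (fun bc word =>
      if PySem.Set.contains common word then (bc.1, bc.2 ++ [word])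
      else if bc.2.length > bc.1.length then (bc.2, ([] : List String))
      else (bc.1, ([] : List String)))
    ([], [])
  let best := if bc.2.length > bc.1.length then bc.2 else bc.1
  if best ≠ [] then PySem.Str.join " " best else display_names.headD ""

-- ===== PORT B =====
def infer_set_name_alt (display_names : List String) : String :=
  let words := PySem.Str.split₀ (display_names.headD "")
  let common : PySem.Set String :=
    if display_names.length > 1 then
      PySem.Set.inter (PySem.Set.ofList words)
        (PySem.Set.ofList ((display_names.drop 1).flatMap PySem.Str.split₀))
    else PySem.Set.ofList words
  let seps := (PySem.List.enumerate words).filterMap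
    (fun p => if PySem.Set.contains common p.2 then none else some p.1)
  let bounds := (-1 : Int) :: (seps ++ [(words.length : Int)])
  match PySem.List.max? (bounds.zip (bounds.drop 1)) (fun iv => iv.2 - iv.1) with
  | none => display_names.headD ""   -- unreachable: bounds always has at least two elements
  | some (a, b) =>
    if b - a > 1 then PySem.Str.join " " (PySem.List.slice words (some (a + 1)) (some b))
    else display_names.headD ""

-- ===== PRECONDITION & SPEC =====
-- Pre_ excludes only the empty list, on which A raises IndexError (display_names[0]).
def Pre_infer_set_name (display_names : List String) : Prop := display_names ≠ []
instance (display_names : List String) : Decidable (Pre_infer_set_name display_names) := by unfold Pre_infer_set_name; infer_instance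
def pvWitness_infer_set_name : List String := (["Sword of the Forge", "Shield of the Forge"])

def Spec_infer_set_name (display_names : List String) (out : String) : Prop := out = infer_set_name_alt display_names
instance (display_names : List String) (out : String) : Decidable (Spec_infer_set_name display_names out) := by unfold Spec_infer_set_name; infer_instance

-- ===== CLAIM (what is proved, stated in full; the proofs are below) =====
def Claim_equal_infer_set_name : Prop := ∀ (display_names : List String), Dom_infer_set_name display_names → Pre_infer_set_name display_names → Spec_infer_set_name display_names (infer_set_name display_names)

-- ===== LEMMAS AND PROOFS =====

-- the common-word set, written exactly as each port builds it, and the predicates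
def pvCommon (d : String) (ds : List String) : PySem.Set String :=
  if (ds.map PySem.Str.split₀).length + 1 > 1 then
    PySem.Set.inter (PySem.Set.ofList (PySem.Str.split₀ d))
      (PySem.Set.ofList ((ds.map PySem.Str.split₀).flatMap id))
  else PySem.Set.ofList (PySem.Str.split₀ d)

def pvPred (d : String) (ds : List String) : String → Bool :=
  fun w => PySem.Set.contains (pvCommon d ds) w

def pvCommonB (d : String) (ds : List String) : PySem.Set String :=
  if ds.length + 1 > 1 then
    PySem.Set.inter (PySem.Set.ofList (PySem.Str.split₀ d))
      (PySem.Set.ofList (ds.flatMap PySem.Str.split₀))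
  else PySem.Set.ofList (PySem.Str.split₀ d)

def pvPredB (d : String) (ds : List String) : String → Bool :=
  fun w => PySem.Set.contains (pvCommonB d ds) w

-- A's loop body, abstracted over the membership predicate
def pvStepA (p : String → Bool) (bc : List String × List String) (word : String) :
    List String × List String :=
  if p word then (bc.1, bc.2 ++ [word])
  else if bc.2.length > bc.1.length then (bc.2, ([] : List String))
  else (bc.1, ([] : List String))

-- first-longest selection step
def pvBest (b r : List String) : List String := if r.length > b.length then r else b

-- A's shape: accumulator walk, then final selection and fallback
def pvAForm (p : String → Bool) (ws : List String) (fb : String) : String :=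
  let bc := ws.foldl (pvStepA p) ([], [])
  let best := if bc.2.length > bc.1.length then bc.2 else bc.1
  if best ≠ [] then PySem.Str.join " " best else fb

-- B's shape: separator positions → boundary intervals → widest interval → slice
def pvBForm (p : String → Bool) (ws : List String) (fb : String) : String :=
  let seps := (PySem.List.enumerate ws).filterMap
    (fun q => if p q.2 then none else some q.1)
  let bounds := (-1 : Int) :: (seps ++ [(ws.length : Int)])
  match PySem.List.max? (bounds.zip (bounds.drop 1)) (fun iv => iv.2 - iv.1) with
  | none => fb
  | some (a, b) =>
    if b - a > 1 then PySem.Str.join " " (PySem.List.slice ws (some (a + 1)) (some b))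
    else fb

-- segments of ws: the maximal common runs INCLUDING the empty gaps between separators
def pvSegs (p : String → Bool) : List String → List String → List (List String)
  | cur, [] => [cur]
  | cur, w :: ws => if p w then pvSegs p (cur ++ [w]) ws else cur :: pvSegs p [] ws

-- the interval list B's zip produces, as a recursion
def pvIvals (p : String → Bool) : Int → Int → List String → List (Int × Int)
  | a, k, [] => [(a, k)]
  | a, k, w :: ws => if p w then pvIvals p a (k + 1) ws else (a, k) :: pvIvals p k (k + 1) ws

theorem pvAForm_eq_foldl (p : String → Bool) (ws : List String) :
    ∀ best cur,
      (if (ws.foldl (pvStepA p) (best, cur)).2.length >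
            (ws.foldl (pvStepA p) (best, cur)).1.length
       then (ws.foldl (pvStepA p) (best, cur)).2
       else (ws.foldl (pvStepA p) (best, cur)).1) =
      (pvSegs p cur ws).foldl pvBest best := by
  induction ws with
  | nil => intro best cur; simp [pvSegs, pvBest]
  | cons w ws ih =>
    intro best cur
    by_cases hp : p w
    · simp only [List.foldl_cons, pvStepA, if_pos hp, pvSegs]
      exact ih best (cur ++ [w])
    · simp only [List.foldl_cons, pvStepA, if_neg hp, pvSegs]
      by_cases hl : cur.length > best.length
      · rw [if_pos hl, show pvBest best cur = cur from by simp [pvBest, hl]]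
        exact ih cur []
      · rw [if_neg hl, show pvBest best cur = best from by simp [pvBest, hl]]
        exact ih best []

theorem pvBest_nil (s : List String) : pvBest [] s = s := by
  unfold pvBest
  by_cases h : s = []
  · simp [h]
  · rw [if_pos]; simpa using List.length_pos_iff.mpr h

theorem pvSegs_ne_nil (p : String → Bool) (ws : List String) :
    ∀ cur, pvSegs p cur ws ≠ [] := by
  induction ws with
  | nil => intro cur; simp [pvSegs]
  | cons w ws ih => intro cur; by_cases hp : p w <;> simp [pvSegs, hp, ih]

theorem pvIvals_ne_nil (p : String → Bool) (ws : List String) :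
    ∀ a k, pvIvals p a k ws ≠ [] := by
  induction ws with
  | nil => intro a k; simp [pvIvals]
  | cons w ws ih => intro a k; by_cases hp : p w <;> simp [pvIvals, hp, ih]

-- PySem.List.max? (b :: rs) by length is A's running first-longest fold
theorem pvMax?_eq_foldl (rs : List (List String)) (b : List String) :
    PySem.List.max? (b :: rs) (fun r => r.length) = some (rs.foldl pvBest b) := by
  unfold PySem.List.max?
  simp only [List.foldl_cons]
  induction rs generalizing b with
  | nil => simp
  | cons r rs ih =>
    simp only [List.foldl_cons]
    rw [← ih]
    congr 1
    simp only [pvBest, gt_iff_lt, apply_ite]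
    split <;> rfl

-- B's zip of the boundary list with its tail IS pvIvals
theorem pvZip_eq_ivals (p : String → Bool) (ws : List String) :
    ∀ (a s : Int),
      ((a :: (((PySem.List.enumerate ws s).filterMap
          (fun q => if p q.2 then none else some q.1)) ++ [s + ws.length])).zip
       ((a :: (((PySem.List.enumerate ws s).filterMap
          (fun q => if p q.2 then none else some q.1)) ++ [s + ws.length])).drop 1)) =
      pvIvals p a s ws := by
  induction ws with
  | nil => intro a s; simp [PySem.List.enumerate, pvIvals]
  | cons w ws ih =>
    intro a s
    rw [PySem.List.enumerate_cons]
    by_cases hp : p w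
    · simp only [List.filterMap_cons, if_pos hp]
      rw [pvIvals, if_pos hp, ← ih a (s + 1)]
      congr 2 <;> [skip; congr 2] <;> simp <;> ring
    · simp only [List.filterMap_cons, if_neg hp]
      rw [pvIvals, if_neg hp, ← ih s (s + 1)]
      simp only [List.cons_append, List.zip_cons_cons, List.drop_succ_cons,
        List.drop_zero]
      congr 3 <;> simp <;> ring

-- every interval is ((a:Nat)-1, (b:Nat)) with a ≤ b ≤ end of the list
theorem pvIvals_shape (p : String → Bool) (ws : List String) :
    ∀ (i k : Nat), i ≤ k →
      ∀ iv ∈ pvIvals p ((i : Int) - 1) (k : Int) ws,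
        ∃ a b : Nat, iv = ((a : Int) - 1, (b : Int)) ∧ a ≤ b ∧ b ≤ k + ws.length := by
  induction ws with
  | nil =>
    intro i k hik iv hiv
    simp only [pvIvals, List.mem_singleton] at hiv
    exact ⟨i, k, by simpa using hiv, hik, by simp⟩
  | cons w ws ih =>
    intro i k hik iv hiv
    by_cases hp : p w
    · rw [pvIvals, if_pos hp] at hiv
      have : ((k : Int) + 1) = ((k + 1 : Nat) : Int) := by push_cast; ring
      rw [this] at hiv
      obtain ⟨a, b, h1, h2, h3⟩ := ih i (k + 1) (by omega) iv hiv
      exact ⟨a, b, h1, h2, by simp at h3 ⊢; omega⟩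
    · rw [pvIvals, if_neg hp] at hiv
      rcases List.mem_cons.mp hiv with h | h
      · exact ⟨i, k, by simpa using h, hik, by simp⟩
      · have h1 : (k : Int) = ((k + 1 : Nat) : Int) - 1 := by push_cast; ring
        have h2 : ((k : Int) + 1) = ((k + 1 : Nat) : Int) := by push_cast; ring
        rw [h2, h1] at h
        obtain ⟨a, b, ha, hb, hc⟩ := ih (k + 1) (k + 1) le_rfl iv h
        exact ⟨a, b, ha, hb, by simp at hc ⊢; omega⟩

-- slicing each interval out of the full list yields exactly the segments
theorem pvIvals_map_slice (p : String → Bool) (full : List String) (ws : List String) :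
    ∀ (i k : Nat) (cur : List String), full.drop k = ws → i ≤ k →
      (full.drop i).take (k - i) = cur →
      (pvIvals p ((i : Int) - 1) (k : Int) ws).map
        (fun iv => PySem.List.slice full (some (iv.1 + 1)) (some iv.2)) =
      pvSegs p cur ws := by
  induction ws with
  | nil =>
    intro i k cur hdrop hik htake
    simp only [pvIvals, List.map_cons, List.map_nil, pvSegs]
    congr 1
    rw [show ((i : Int) - 1 + 1) = ((i : Nat) : Int) by ring,
      PySem.List.slice_natCast, htake]
  | cons w ws ih =>
    intro i k cur hdrop hik htake
    have hkfull : k < full.length := by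
      by_contra h
      rw [List.drop_eq_nil_of_le (by omega)] at hdrop
      exact List.cons_ne_nil w ws hdrop.symm
    have hgetk : full[k]? = some w := by
      have h0 : (full.drop k)[(0 : Nat)]? = full[k + 0]? := List.getElem?_drop
      rw [hdrop] at h0; simpa using h0.symm
    have hdrop' : full.drop (k + 1) = ws := by
      have h1 : full.drop (k + 1) = (full.drop k).drop 1 := by
        rw [List.drop_drop, Nat.add_comm]
      rw [h1, hdrop, List.drop_succ_cons, List.drop_zero]
    by_cases hp : p w
    · rw [pvIvals, if_pos hp, pvSegs, if_pos hp,
        show ((k : Int) + 1) = ((k + 1 : Nat) : Int) by push_cast; ring]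
      apply ih i (k + 1) (cur ++ [w]) hdrop' (by omega)
      have : k + 1 - i = (k - i) + 1 := by omega
      rw [this, List.take_add_one, htake]
      congr 1
      have : (full.drop i)[k - i]? = full[i + (k - i)]? := List.getElem?_drop
      rw [show i + (k - i) = k by omega] at this
      rw [this, hgetk]; rfl
    · rw [pvIvals, if_neg hp, pvSegs, if_neg hp, List.map_cons]
      congr 1
      · rw [show ((i : Int) - 1 + 1) = ((i : Nat) : Int) by ring,
          PySem.List.slice_natCast, htake]
      · rw [show ((k : Int) + 1) = ((k + 1 : Nat) : Int) by push_cast; ring,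
          show (k : Int) = ((k + 1 : Nat) : Int) - 1 by push_cast; ring]
        exact ih (k + 1) (k + 1) [] hdrop' le_rfl (by simp)

-- the two first-max fold steps, named so the match auxiliaries are shared
def pvFoldMaxI (a : Option (Int × Int)) (x : Int × Int) : Option (Int × Int) :=
  match a with
  | none => some x
  | some m => if (m.2 - m.1) < (x.2 - x.1) then some x else some m

def pvFoldMaxL (a : Option (List String)) (x : List String) : Option (List String) :=
  match a with
  | none => some x
  | some m => if m.length < x.length then some x else some m

theorem pvMaxI_eq (I : List (Int × Int)) :
    PySem.List.max? I (fun iv => iv.2 - iv.1) = I.foldl pvFoldMaxI none := by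
  unfold PySem.List.max?
  congr 1
  funext a x
  cases a <;> rfl

theorem pvMaxL_eq (I : List (List String)) :
    PySem.List.max? I (fun r => r.length) = I.foldl pvFoldMaxL none := by
  unfold PySem.List.max?
  congr 1
  funext a x
  cases a <;> rfl

-- mapping g through the first-max fold (keys differ by the fixed +1 shift)
theorem pvMax?_map (g : Int × Int → List String) (I : List (Int × Int)) :
    ∀ (acc : Option (Int × Int)),
      (∀ iv ∈ I, iv.2 - iv.1 = ((g iv).length : Int) + 1) →
      (∀ iv, acc = some iv → iv.2 - iv.1 = ((g iv).length : Int) + 1) →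
      Option.map g (I.foldl pvFoldMaxI acc) =
      (I.map g).foldl pvFoldMaxL (Option.map g acc) := by
  induction I with
  | nil => intro acc _ _; rfl
  | cons x I ih =>
    intro acc hI hacc
    simp only [List.foldl_cons, List.map_cons, pvFoldMaxI, pvFoldMaxL]
    have hx := hI x (List.mem_cons_self)
    have hI' : ∀ iv ∈ I, iv.2 - iv.1 = ((g iv).length : Int) + 1 :=
      fun iv hiv => hI iv (List.mem_cons_of_mem _ hiv)
    cases acc with
    | none => exact ih (some x) hI' (by rintro iv ⟨rfl⟩; exact hx)
    | some m =>
      have hm := hacc m rfl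
      have hcond : ((m.2 - m.1) < (x.2 - x.1)) = ((g m).length < (g x).length) := by
        rw [hm, hx]; simp only [eq_iff_iff]
        constructor <;> intro h <;> omega
      simp only [Option.map_some, hcond]
      by_cases h : (g m).length < (g x).length
      · simp only [if_pos h]
        exact ih (some x) hI' (by rintro iv ⟨rfl⟩; exact hx)
      · simp only [if_neg h]
        exact ih (some m) hI' (by rintro iv ⟨rfl⟩; exact hm)

-- the core equivalence, for any membership predicate
theorem pvForms_eq (p : String → Bool) (ws : List String) (fb : String) :
    pvAForm p ws fb = pvBForm p ws fb := by
  simp only [pvAForm, pvBForm]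
  rw [show ((ws.length : Int)) = (0 : Int) + ws.length by ring, pvZip_eq_ivals p ws (-1) 0]
  have hivals0 : pvIvals p (-1) 0 ws = pvIvals p (((0 : Nat) : Int) - 1) ((0 : Nat) : Int) ws := by
    norm_num
  set g : Int × Int → List String :=
    fun iv => PySem.List.slice ws (some (iv.1 + 1)) (some iv.2) with hg
  have hmap : (pvIvals p (-1) 0 ws).map g = pvSegs p [] ws := by
    rw [hivals0]
    exact pvIvals_map_slice p ws ws 0 0 [] (by simp) le_rfl (by simp)
  have hkey : ∀ iv ∈ pvIvals p (-1) 0 ws, iv.2 - iv.1 = ((g iv).length : Int) + 1 := by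
    intro iv hiv
    rw [hivals0] at hiv
    obtain ⟨a, b, rfl, hab, hbl⟩ := pvIvals_shape p ws 0 0 le_rfl iv hiv
    simp only [hg]
    rw [show ((a : Int) - 1 + 1) = ((a : Nat) : Int) by ring, PySem.List.slice_natCast]
    have hlen : ((ws.drop a).take (b - a)).length = b - a := by
      simp only [List.length_take, List.length_drop]
      simp at hbl; omega
    rw [hlen]; push_cast [Nat.cast_sub hab]; ring
  have hmax := pvMax?_map g (pvIvals p (-1) 0 ws) none hkey (by simp)
  simp only [Option.map_none] at hmax
  rw [← pvMaxI_eq, ← pvMaxL_eq] at hmax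
  have hA := pvAForm_eq_foldl p ws [] []
  obtain ⟨s0, rest, hsegs⟩ : ∃ s0 rest, pvSegs p [] ws = s0 :: rest := by
    cases h : pvSegs p [] ws with
    | nil => exact absurd h (pvSegs_ne_nil p ws [])
    | cons s0 rest => exact ⟨s0, rest, rfl⟩
  have hSfold : (pvSegs p [] ws).foldl pvBest [] = rest.foldl pvBest s0 := by
    rw [hsegs, List.foldl_cons, pvBest_nil]
  have hmaxI : PySem.List.max? (pvIvals p (-1) 0 ws) (fun iv => iv.2 - iv.1) ≠ none := by
    intro h
    exact pvIvals_ne_nil p ws (-1) 0 ((PySem.List.max?_eq_none_iff _ _).mp h)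
  cases hmi : PySem.List.max? (pvIvals p (-1) 0 ws) (fun iv => iv.2 - iv.1) with
  | none => exact absurd hmi hmaxI
  | some m =>
    have hmem : m ∈ pvIvals p (-1) 0 ws := PySem.List.max?_mem hmi
    have hgm : g m = rest.foldl pvBest s0 := by
      have h1 := hmax
      rw [hmi, hmap, hsegs, pvMax?_eq_foldl] at h1
      simpa using h1
    obtain ⟨a, b⟩ := m
    have hkm := hkey (a, b) hmem
    simp only at hkm
    rw [hA, hSfold, ← hgm]
    show _ = if b - a > 1 then PySem.Str.join " " (PySem.List.slice ws (some (a + 1)) (some b)) else fb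
    by_cases hbig : b - a > 1
    · have hne : g (a, b) ≠ [] := by
        intro hnil
        rw [hnil] at hkm
        simp only [List.length_nil, Nat.cast_zero] at hkm
        omega
      rw [if_pos hbig, if_pos hne]
    · have hnil : g (a, b) = [] := by
        have h0 : ((g (a, b)).length : Int) = 0 := by omega
        rw [← List.length_eq_zero_iff]
        exact_mod_cast h0
      rw [if_neg hbig, if_neg (by simp [hnil])]

-- ===== VERDICT =====
theorem infer_set_name_spec : Claim_equal_infer_set_name := by
  intro display_names _ hpre
  unfold Spec_infer_set_name
  match display_names with
  | [] => exact absurd rfl hpre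
  | d :: ds =>
    have hpq : pvPred d ds = pvPredB d ds := by
      funext w
      simp [pvPred, pvPredB, pvCommon, pvCommonB, List.flatMap_map]
    have hA : infer_set_name (d :: ds) = pvAForm (pvPred d ds) (PySem.Str.split₀ d) d := rfl
    have hB : infer_set_name_alt (d :: ds) = pvBForm (pvPredB d ds) (PySem.Str.split₀ d) d := rfl
    rw [hA, hB, hpq, pvForms_eq]
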